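-- pv_equiv track=rewrite | github.com/SLI0124/metody-analyzy-textovych-dat | tasks/task3.py | autocorrect_word_dict_approach
-- ===== SOURCE A (Python) =====
-- def levenstein_distance_dp(word1, word2):
--     n = len(word1)
--     m = len(word2)
--     dp = []
--
--     for i in range(n + 1):  # Initialize dp table with zeros
--         dp.append([0] * (m + 1))
--
--     # Base cases: distance from empty string requires i deletions or j insertions
--     for i in range(n + 1):
--         dp[i][0] = i
--     for j in range(m + 1):
--         dp[0][j] = j
--
--     # Fill dp table calculating minimum edit distance at each position
--     for i in range(1, n + 1):
--         for j in range(1, m + 1):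
--             dp[i][j] = min(
--                 dp[i - 1][j] + 1,  # Deletion
--                 dp[i][j - 1] + 1,  # Insertion
--                 dp[i - 1][j - 1] + (word1[i - 1] != word2[j - 1])  # Substitution or match
--             )
--     return dp[n][m], dp
--
-- def autocorrect_word_dict_approach(word, word_counts, max_distance=2):
--     if word in word_counts:
--         return word
--
--     candidates = {}
--     for dict_word, freq in word_counts.items():
--         distance, _ = levenstein_distance_dp(word, dict_word)
--         if distance <= max_distance:
--             candidates[dict_word] = freq
--
--     return max(candidates.items(), key=lambda x: x[1])[0] if candidates else word
-- ===== SOURCE B (Python) =====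
-- def _within_distance(w1, w2, maxd):
--     # rolling two-row Levenshtein with early abandon: row minima never decrease,
--     # so once the current row's minimum exceeds maxd the distance does too.
--     prev = list(range(len(w2) + 1))
--     for i, c in enumerate(w1):
--         cur = [i + 1]
--         for j, d in enumerate(w2):
--             cur.append(min(prev[j + 1] + 1, cur[j] + 1, prev[j] + (c != d)))
--         if min(cur) > maxd:
--             return False
--         prev = cur
--     return prev[-1] <= maxd
--
--
-- def autocorrect_word_dict_approach(word, word_counts, max_distance=2):
--     best_word = None
--     best_freq = 0
--     for dict_word, freq in word_counts.items():
--         if dict_word == word: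
--             return word
--         if best_word is not None and freq <= best_freq:
--             continue  # cannot beat the current best; skip the DP entirely
--         if _within_distance(word, dict_word, max_distance):
--             best_word, best_freq = dict_word, freq
--     return best_word if best_word is not None else word
-- ===== Notes on version B (the rewrite author's own statement) =====
-- stated objective: alternative
-- what changed: B replaces A's full (n+1)x(m+1) Levenshtein table per dictionary word plus a candidate dict and a final max() pass by a rolling two-row DP with an early abandon as soon as the current row's minimum exceeds max_distance, a frequency pre-filter that skips the DP for words that cannot beat the current best, and a single running-best scan that returns immediately on an exact match.
import Mathlib
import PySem

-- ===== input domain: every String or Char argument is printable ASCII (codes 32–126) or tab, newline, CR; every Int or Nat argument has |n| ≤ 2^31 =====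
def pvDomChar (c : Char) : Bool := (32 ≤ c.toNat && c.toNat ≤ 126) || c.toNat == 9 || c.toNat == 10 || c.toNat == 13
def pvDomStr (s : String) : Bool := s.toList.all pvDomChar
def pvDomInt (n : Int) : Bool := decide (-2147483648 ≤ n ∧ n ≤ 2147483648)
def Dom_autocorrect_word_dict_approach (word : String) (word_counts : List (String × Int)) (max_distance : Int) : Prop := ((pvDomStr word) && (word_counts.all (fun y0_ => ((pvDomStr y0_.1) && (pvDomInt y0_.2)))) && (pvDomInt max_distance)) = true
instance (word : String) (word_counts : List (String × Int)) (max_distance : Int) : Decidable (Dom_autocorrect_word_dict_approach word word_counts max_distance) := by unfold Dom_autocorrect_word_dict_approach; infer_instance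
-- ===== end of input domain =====

-- B replaces A's full (n+1)×(m+1) Levenshtein table per dictionary word and its candidate
-- dict + max() pass by a rolling two-row DP with an early row-minimum cutoff, a frequency
-- pre-filter, and a single running-best scan: a structurally different algorithm of the
-- same worst-case cost (no speed is claimed).

-- ===== PORT A =====
-- 2D table access; every index used by the loops below is in range, so getD/set access is exact
def pvGet2 (dp : List (List Int)) (i j : Nat) : Int := (dp.getD i []).getD j 0
def pvSet2 (dp : List (List Int)) (i j : Nat) (v : Int) : List (List Int) :=
  dp.set i ((dp.getD i []).set j v)

def levenstein_distance_dp (word1 word2 : String) : Int × List (List Int) :=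
  let w1 := word1.toList
  let w2 := word2.toList
  let n := w1.length
  let m := w2.length
  -- for i in range(n+1): dp.append([0]*(m+1))
  let dp0 := (List.range (n + 1)).foldl (fun dp _ => dp ++ [List.replicate (m + 1) (0 : Int)]) []
  -- for i in range(n+1): dp[i][0] = i
  let dp1 := (List.range (n + 1)).foldl (fun dp i => pvSet2 dp i 0 (i : Int)) dp0
  -- for j in range(m+1): dp[0][j] = j
  let dp2 := (List.range (m + 1)).foldl (fun dp j => pvSet2 dp 0 j (j : Int)) dp1
  -- for i in range(1, n+1): for j in range(1, m+1): dp[i][j] = min(...)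
  let dp3 := (List.range' 1 n).foldl (fun dp i =>
      (List.range' 1 m).foldl (fun dp j =>
        pvSet2 dp i j (min (min (pvGet2 dp (i - 1) j + 1) (pvGet2 dp i (j - 1) + 1))
          (pvGet2 dp (i - 1) (j - 1) + (if w1.getD (i - 1) ' ' ≠ w2.getD (j - 1) ' ' then 1 else 0)))) dp) dp2
  (pvGet2 dp3 n m, dp3)

def autocorrect_word_dict_approach (word : String) (word_counts : List (String × Int)) (max_distance : Int) : String :=
  let d := PySem.Dict.ofList word_counts   -- the dict argument, as the Python dict it denotes
  if d.contains word then word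
  else
    let candidates := d.items.foldl (fun cand p =>
      if (levenstein_distance_dp word p.1).1 ≤ max_distance then cand.insert p.1 p.2 else cand)
      PySem.Dict.empty
    match PySem.List.max? candidates.items (fun x => x.2) with
    | some p => p.1
    | none => word

-- ===== PORT B =====
-- inner loop of Source B's _within_distance: for d, diag, up in zip(w2, prev, prev[1:]): left = min(...); cur.append(left)
def pvRowRec (c : Char) : List (Char × Int × Int) → Int → List Int
  | [], _ => []
  | (d, du) :: t, left =>
    let e := min (min (du.2 + 1) (left + 1)) (du.1 + (if c ≠ d then 1 else 0))
    e :: pvRowRec c t e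

def pvNextRow (c : Char) (w2 : List Char) (prev : List Int) : List Int :=
  let left := PySem.List.pyGetD prev 0 0 + 1
  left :: pvRowRec c (w2.zip (prev.zip prev.tail)) left

-- min(cur) on the (always nonempty) current row
def pvMinList : List Int → Int
  | [] => 0
  | x :: t => t.foldl min x

def pvWithinGo (w2 : List Char) (maxd : Int) : List Char → List Int → Bool
  | [], prev => decide (PySem.List.pyGetD prev (-1) 0 ≤ maxd)
  | c :: cs, prev =>
    let cur := pvNextRow c w2 prev
    if maxd < pvMinList cur then false else pvWithinGo w2 maxd cs cur

def pvWithin (w1 w2 : List Char) (maxd : Int) : Bool :=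
  pvWithinGo w2 maxd w1 (PySem.List.pyRange 0 ((w2.length : Int) + 1) 1)

def pvScan (word : String) (maxd : Int) : List (String × Int) → Option (String × Int) → String
  | [], best => match best with | some p => p.1 | none => word
  | (w, f) :: rest, best =>
    if w == word then word
    else if (match best with | some q => decide (f ≤ q.2) | none => false) then pvScan word maxd rest best
    else if pvWithin word.toList w.toList maxd then pvScan word maxd rest (some (w, f))
    else pvScan word maxd rest best

def autocorrect_word_dict_approach_alt (word : String) (word_counts : List (String × Int)) (max_distance : Int) : String :=
  pvScan word max_distance (PySem.Dict.ofList word_counts).items none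

-- ===== PRECONDITION & SPEC =====
def Spec_autocorrect_word_dict_approach (word : String) (word_counts : List (String × Int)) (max_distance : Int) (out : String) : Prop := out = autocorrect_word_dict_approach_alt word word_counts max_distance
instance (word : String) (word_counts : List (String × Int)) (max_distance : Int) (out : String) : Decidable (Spec_autocorrect_word_dict_approach word word_counts max_distance out) := by unfold Spec_autocorrect_word_dict_approach; infer_instance

-- ===== CLAIM (what is proved, stated in full; the proofs are below) =====
def Claim_equal_autocorrect_word_dict_approach : Prop := ∀ (word : String) (word_counts : List (String × Int)) (max_distance : Int), Dom_autocorrect_word_dict_approach word word_counts max_distance → Spec_autocorrect_word_dict_approach word word_counts max_distance (autocorrect_word_dict_approach word word_counts max_distance)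

-- ===== LEMMAS AND PROOFS =====

-- the sequence of DP rows both programs compute
def pvRows (w1 w2 : List Char) : Nat → List Int
  | 0 => PySem.List.pyRange 0 ((w2.length : Int) + 1) 1
  | i + 1 => pvNextRow (w1.getD i ' ') w2 (pvRows w1 w2 i)

theorem pvRowRec_length (c : Char) (l : List (Char × Int × Int)) (left : Int) :
    (pvRowRec c l left).length = l.length := by
  induction l generalizing left with
  | nil => rfl
  | cons p t ih => obtain ⟨d, du⟩ := p; simp [pvRowRec, ih]

theorem pvNextRow_length (c : Char) (w2 : List Char) (prev : List Int)
    (h : prev.length = w2.length + 1) :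
    (pvNextRow c w2 prev).length = w2.length + 1 := by
  simp [pvNextRow, pvRowRec_length, List.length_zip, List.length_tail, h]

theorem pvRows_length (w1 w2 : List Char) (i : Nat) :
    (pvRows w1 w2 i).length = w2.length + 1 := by
  induction i with
  | zero => simp [pvRows, PySem.List.length_pyRange_one]
  | succ i ih => simpa [pvRows] using pvNextRow_length _ w2 _ ih

theorem pvRows_ne_nil (w1 w2 : List Char) (i : Nat) : pvRows w1 w2 i ≠ [] := by
  have := pvRows_length w1 w2 i
  intro h; rw [h] at this; simp at this

theorem pvRows_zero_getD (w2 w1 : List Char) (j : Nat) (hj : j < w2.length + 1) :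
    (pvRows w1 w2 0).getD j 0 = (j : Int) := by
  have hlen : j < (pvRows w1 w2 0).length := by rw [pvRows_length]; exact hj
  rw [List.getD_eq_getElem _ _ hlen]
  simp only [pvRows]
  rw [PySem.List.getElem_pyRange_one]
  simp

theorem pvRows_head (w1 w2 : List Char) (i : Nat) :
    (pvRows w1 w2 i).getD 0 0 = (i : Int) := by
  induction i with
  | zero => exact pvRows_zero_getD w2 w1 0 (by omega)
  | succ i ih =>
    show (pvNextRow _ w2 _).getD 0 0 = _
    simp only [pvNextRow, PySem.List.pyGetD_zero, List.getD_cons_zero]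
    rw [ih]
    push_cast; ring

theorem pvRowRec_getD (c : Char) (l : List (Char × Int × Int)) (left : Int) (j : Nat)
    (hj : j < l.length) :
    (pvRowRec c l left).getD j 0 =
      min (min ((l.getD j ('a', 0, 0)).2.2 + 1) ((left :: pvRowRec c l left).getD j 0 + 1))
        ((l.getD j ('a', 0, 0)).2.1 + (if c ≠ (l.getD j ('a', 0, 0)).1 then 1 else 0)) := by
  induction l generalizing left j with
  | nil => simp at hj
  | cons p t ih =>
    obtain ⟨d, du⟩ := p
    cases j with
    | zero => simp [pvRowRec]
    | succ j =>
      have hj' : j < t.length := by simpa using hj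
      simp only [pvRowRec, List.getD_cons_succ]
      exact ih _ j hj'

theorem zip3_getD (w2 : List Char) (prev : List Int) (j : Nat)
    (hlen : prev.length = w2.length + 1) (hj : j < w2.length) :
    (w2.zip (prev.zip prev.tail)).getD j ('a', 0, 0) =
      (w2.getD j ' ', prev.getD j 0, prev.getD (j + 1) 0) := by
  have hz : (w2.zip (prev.zip prev.tail)).length = w2.length := by
    simp [List.length_zip, List.length_tail, hlen]
  have hjz : j < (w2.zip (prev.zip prev.tail)).length := by omega
  rw [List.getD_eq_getElem _ _ hjz]
  have h1 : j < w2.length := hj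
  have h2 : j < prev.length := by omega
  have h3 : j < prev.tail.length := by simp [List.length_tail]; omega
  have h4 : j + 1 < prev.length := by omega
  simp only [List.getElem_zip, List.getElem_tail]
  rw [List.getD_eq_getElem _ _ h1, List.getD_eq_getElem _ _ h2, List.getD_eq_getElem _ _ h4]

theorem pvNextRow_getD_succ (c : Char) (w2 : List Char) (prev : List Int)
    (hlen : prev.length = w2.length + 1) (j : Nat) (hj : j < w2.length) :
    (pvNextRow c w2 prev).getD (j + 1) 0 =
      min (min (prev.getD (j + 1) 0 + 1) ((pvNextRow c w2 prev).getD j 0 + 1))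
        (prev.getD j 0 + (if c ≠ w2.getD j ' ' then 1 else 0)) := by
  have hz : j < (w2.zip (prev.zip prev.tail)).length := by
    simp [List.length_zip, List.length_tail, hlen]; omega
  have := pvRowRec_getD c (w2.zip (prev.zip prev.tail)) (PySem.List.pyGetD prev 0 0 + 1) j hz
  rw [zip3_getD w2 prev j hlen hj] at this
  simpa [pvNextRow, List.getD_cons_succ] using this

-- every element of the new row is at least P, when P bounds prev's entries and left
theorem pvRowRec_ge (c : Char) (l : List (Char × Int × Int)) (left P : Int)
    (hl : ∀ p ∈ l, P ≤ p.2.1 ∧ P ≤ p.2.2) (hleft : P ≤ left) :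
    ∀ e ∈ pvRowRec c l left, P ≤ e := by
  induction l generalizing left with
  | nil => simp [pvRowRec]
  | cons p t ih =>
    obtain ⟨d, du⟩ := p
    intro e he
    have hdu := hl (d, du) (by simp)
    simp only at hdu
    have hmin : P ≤ min (min (du.2 + 1) (left + 1)) (du.1 + (if c ≠ d then 1 else 0)) := by
      have hcost : (0:Int) ≤ (if c ≠ d then 1 else 0) := by split <;> omega
      simp only [le_min_iff]
      exact ⟨⟨by omega, by omega⟩, by omega⟩
    simp only [pvRowRec, List.mem_cons] at he
    rcases he with rfl | he
    · exact hmin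
    · exact ih _ (fun q hq => hl q (by simp [hq])) hmin e he

theorem le_pvMinList (xs : List Int) (P : Int) (hne : xs ≠ []) (h : ∀ x ∈ xs, P ≤ x) :
    P ≤ pvMinList xs := by
  cases xs with
  | nil => simp at hne
  | cons x t =>
    show P ≤ t.foldl min x
    clear hne
    induction t generalizing x with
    | nil => exact h x (by simp)
    | cons y t ih =>
      show P ≤ t.foldl min (min x y)
      have hx := h x (by simp)
      have hy := h y (by simp)
      refine ih (min x y) ?_
      intro z hz
      rcases List.mem_cons.mp hz with rfl | hz
      · exact le_min hx hy
      · exact h z (by simp [hz])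

theorem pvMinList_le (xs : List Int) (x : Int) (hx : x ∈ xs) : pvMinList xs ≤ x := by
  cases xs with
  | nil => simp at hx
  | cons y t =>
    show t.foldl min y ≤ x
    rcases List.mem_cons.mp hx with rfl | hx
    · exact (PySem.List.foldl_min_le t x).1
    · exact (PySem.List.foldl_min_le t y).2 x hx

theorem pvMinList_nextRow_ge (c : Char) (w2 : List Char) (prev : List Int) (hne : prev ≠ []) :
    pvMinList prev ≤ pvMinList (pvNextRow c w2 prev) := by
  set P := pvMinList prev with hP
  have hhead : P ≤ prev.getD 0 0 := by
    cases prev with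
    | nil => simp at hne
    | cons a t => exact pvMinList_le _ _ (by simp)
  apply le_pvMinList _ _ (by simp [pvNextRow])
  intro x hx
  simp only [pvNextRow, List.mem_cons, PySem.List.pyGetD_zero] at hx
  rcases hx with rfl | hx
  · omega
  · refine pvRowRec_ge c _ _ P ?_ (by omega) x hx
    intro p hp
    obtain ⟨hp1, hp2⟩ := List.of_mem_zip hp
    obtain ⟨hq1, hq2⟩ := List.of_mem_zip (by exact hp2)
    exact ⟨pvMinList_le _ _ hq1, pvMinList_le _ _ (List.mem_of_mem_tail hq2)⟩

theorem pvRows_min_mono (w1 w2 : List Char) (i k : Nat) (h : i ≤ k) :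
    pvMinList (pvRows w1 w2 i) ≤ pvMinList (pvRows w1 w2 k) := by
  induction k with
  | zero => have : i = 0 := by omega
            simp [this]
  | succ k ih =>
    rcases Nat.lt_or_ge i (k+1) with hlt | hge
    · have := ih (by omega)
      calc pvMinList (pvRows w1 w2 i) ≤ pvMinList (pvRows w1 w2 k) := this
        _ ≤ _ := pvMinList_nextRow_ge _ w2 _ (pvRows_ne_nil w1 w2 k)
    · have : i = k + 1 := by omega
      simp [this]

-- final distance (pvRows n).getD m is bounded below by any row's minimum
theorem pvRows_final_ge_min (w1 w2 : List Char) (i : Nat) (h : i ≤ w1.length) :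
    pvMinList (pvRows w1 w2 i) ≤ (pvRows w1 w2 w1.length).getD w2.length 0 := by
  have h1 := pvRows_min_mono w1 w2 i w1.length h
  have hm : w2.length < (pvRows w1 w2 w1.length).length := by rw [pvRows_length]; omega
  have h2 : pvMinList (pvRows w1 w2 w1.length) ≤ (pvRows w1 w2 w1.length).getD w2.length 0 := by
    rw [List.getD_eq_getElem _ _ hm]
    exact pvMinList_le _ _ (List.getElem_mem hm)
  omega

theorem pvWithinGo_eq (w1 w2 : List Char) (maxd : Int) :
    ∀ (cs pre : List Char), w1 = pre ++ cs →
    pvWithinGo w2 maxd cs (pvRows w1 w2 pre.length) =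
      decide ((pvRows w1 w2 w1.length).getD w2.length 0 ≤ maxd) := by
  intro cs
  induction cs with
  | nil =>
    intro pre hpre
    rw [List.append_nil] at hpre
    subst hpre
    have hnn := pvRows_ne_nil w1 w2 w1.length
    show decide (PySem.List.pyGetD (pvRows w1 w2 w1.length) (-1) 0 ≤ maxd) = _
    rw [PySem.List.pyGetD_neg_one _ _ hnn, List.getLast_eq_getElem hnn]
    congr 1
    rw [List.getD_eq_getElem _ _ (show w2.length < (pvRows w1 w2 w1.length).length by
      rw [pvRows_length]; omega)]
    simp [pvRows_length]
  | cons c cs ih =>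
    intro pre hpre
    have hc : w1.getD pre.length ' ' = c := by
      rw [hpre, List.getD_eq_getElem _ _ (show pre.length < (pre ++ c :: cs).length by simp)]
      simp
    have hcur : pvNextRow c w2 (pvRows w1 w2 pre.length) = pvRows w1 w2 (pre.length + 1) := by
      show _ = pvNextRow (w1.getD pre.length ' ') w2 (pvRows w1 w2 pre.length)
      rw [hc]
    show (if maxd < pvMinList (pvNextRow c w2 (pvRows w1 w2 pre.length)) then false
          else pvWithinGo w2 maxd cs (pvNextRow c w2 (pvRows w1 w2 pre.length))) = _
    rw [hcur]
    split
    · rename_i hcut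
      have hle : pre.length + 1 ≤ w1.length := by simp [hpre]
      have := pvRows_final_ge_min w1 w2 (pre.length + 1) hle
      symm
      simp only [decide_eq_false_iff_not]
      omega
    · have := ih (pre ++ [c]) (by simp [hpre])
      simpa using this

theorem pvWithin_eq (w1 w2 : List Char) (maxd : Int) :
    pvWithin w1 w2 maxd = decide ((pvRows w1 w2 w1.length).getD w2.length 0 ≤ maxd) := by
  have := pvWithinGo_eq w1 w2 maxd w1 [] rfl
  simpa [pvWithin, pvRows] using this

-- ===== A-side: the table invariant =====
def pvTab (n m : Nat) (g : Nat → Nat → Int) (dp : List (List Int)) : Prop :=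
  dp.length = n + 1 ∧ (∀ i, i < n + 1 → (dp.getD i []).length = m + 1) ∧
  ∀ i j, i < n + 1 → j < m + 1 → pvGet2 dp i j = g i j

theorem pvTab_congr {n m : Nat} {g g' : Nat → Nat → Int} {dp : List (List Int)}
    (h : pvTab n m g dp) (hgg : ∀ i j, i < n + 1 → j < m + 1 → g i j = g' i j) :
    pvTab n m g' dp := by
  obtain ⟨h1, h2, h3⟩ := h
  exact ⟨h1, h2, fun i j hi hj => (h3 i j hi hj).trans (hgg i j hi hj)⟩

theorem pvTab_set2 {n m : Nat} {g : Nat → Nat → Int} {dp : List (List Int)}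
    (h : pvTab n m g dp) (a b : Nat) (v : Int) (ha : a < n + 1) (hb : b < m + 1) :
    pvTab n m (fun i j => if i = a ∧ j = b then v else g i j) (pvSet2 dp a b v) := by
  obtain ⟨h1, h2, h3⟩ := h
  have hrow : ∀ i, i < n + 1 → (pvSet2 dp a b v).getD i [] =
      if i = a then (dp.getD a []).set b v else dp.getD i [] := by
    intro i hi
    have hi' : i < dp.length := by omega
    have ha' : a < dp.length := by omega
    unfold pvSet2
    rw [List.getD_eq_getElem _ _ (by rw [List.length_set]; omega)]
    rw [List.getElem_set]
    split
    · rename_i hh; simp [hh]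
    · rename_i hh
      rw [List.getD_eq_getElem _ _ hi']
      simp [Ne.symm hh]
  refine ⟨by simp [pvSet2, List.length_set, h1], ?_, ?_⟩
  · intro i hi
    rw [hrow i hi]
    split
    · rw [List.length_set]; exact h2 a ha
    · exact h2 i hi
  · intro i j hi hj
    unfold pvGet2
    rw [hrow i hi]
    by_cases hia : i = a
    · subst hia
      simp only [if_true, true_and]
      have hbl : b < (dp.getD i []).length := by rw [h2 i hi]; omega
      have hjl : j < (dp.getD i []).length := by rw [h2 i hi]; omega
      rw [List.getD_eq_getElem _ _ (show j < ((dp.getD i []).set b v).length by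
        rw [List.length_set]; omega)]
      rw [List.getElem_set]
      by_cases hjb : j = b
      · simp [hjb]
      · simp only [if_neg (by omega : ¬ b = j)]
        rw [← List.getD_eq_getElem _ (0:Int) hjl]
        simp [hjb]
        exact h3 i j hi hj
    · simp only [if_neg hia, if_neg (by tauto : ¬ (i = a ∧ j = b))]
      exact h3 i j hi hj

theorem pvTab_stage0 (n m : Nat) :
    pvTab n m (fun _ _ => 0)
      ((List.range (n + 1)).foldl (fun dp _ => dp ++ [List.replicate (m + 1) (0 : Int)]) []) := by
  rw [PySem.List.foldl_append_singleton_eq_map]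
  simp only [List.nil_append, List.map_const', List.length_range]
  refine ⟨by simp, ?_, ?_⟩
  · intro i hi; rw [List.getD_replicate _ hi]; simp
  · intro i j hi hj
    unfold pvGet2
    rw [List.getD_replicate _ hi, List.getD_replicate _ hj]

theorem pvTab_stage1 (n m : Nat) (dp0 : List (List Int)) (h : pvTab n m (fun _ _ => 0) dp0) :
    pvTab n m (fun i j => if j = 0 then (i : Int) else 0)
      ((List.range (n + 1)).foldl (fun dp i => pvSet2 dp i 0 (i : Int)) dp0) := by
  suffices H : ∀ k, k ≤ n + 1 → pvTab n m (fun i j => if j = 0 ∧ i < k then (i : Int) else 0)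
      ((List.range k).foldl (fun dp i => pvSet2 dp i 0 (i : Int)) dp0) by
    refine pvTab_congr (H (n + 1) le_rfl) ?_
    intro i j hi hj
    by_cases hj0 : j = 0 <;> simp [hj0, hi]
  intro k hk
  induction k with
  | zero => simpa using h
  | succ k ih =>
    rw [List.range_succ, List.foldl_append]
    simp only [List.foldl_cons, List.foldl_nil]
    have := pvTab_set2 (ih (by omega)) k 0 (k : Int) (by omega) (by omega)
    refine pvTab_congr this ?_
    intro i j hi hj
    by_cases hik : i = k
    · subst hik; by_cases hj0 : j = 0 <;> simp [hj0]
    · by_cases hj0 : j = 0 <;> simp [hj0, hik] <;> omega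

theorem pvTab_stage2 (n m : Nat) (dp1 : List (List Int))
    (h : pvTab n m (fun i j => if j = 0 then (i : Int) else 0) dp1) :
    pvTab n m (fun i j => if i = 0 then (j : Int) else if j = 0 then (i : Int) else 0)
      ((List.range (m + 1)).foldl (fun dp j => pvSet2 dp 0 j (j : Int)) dp1) := by
  suffices H : ∀ k, k ≤ m + 1 → pvTab n m
      (fun i j => if i = 0 ∧ j < k then (j : Int) else if j = 0 then (i : Int) else 0)
      ((List.range k).foldl (fun dp j => pvSet2 dp 0 j (j : Int)) dp1) by
    refine pvTab_congr (H (m + 1) le_rfl) ?_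
    intro i j hi hj
    by_cases hi0 : i = 0 <;> simp [hi0, hj]
  intro k hk
  induction k with
  | zero => simpa using h
  | succ k ih =>
    rw [List.range_succ, List.foldl_append]
    simp only [List.foldl_cons, List.foldl_nil]
    have := pvTab_set2 (ih (by omega)) 0 k (k : Int) (by omega) (by omega)
    refine pvTab_congr this ?_
    intro i j hi hj
    by_cases hi0 : i = 0
    · subst hi0
      by_cases hjk : j = k
      · simp [hjk]
      · simp [hjk]; omega
    · simp [hi0]

-- stage-2 table entries named
def pvG2 (i j : Nat) : Int := if i = 0 then (j : Int) else if j = 0 then (i : Int) else 0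
-- entries after rows 1..k of the fill loop
def pvG3 (w1 w2 : List Char) (k i j : Nat) : Int :=
  if i ≤ k then (pvRows w1 w2 i).getD j 0 else pvG2 i j

theorem pvRows_getD_zero_col (w1 w2 : List Char) (i : Nat) :
    (pvRows w1 w2 i).getD 0 0 = (i : Int) := pvRows_head w1 w2 i

theorem pvTab_inner (w1 w2 : List Char) (n m : Nat) (hn : n = w1.length) (hm : m = w2.length)
    (k : Nat) (hk : k < n) (dp : List (List Int)) (h : pvTab n m (pvG3 w1 w2 k) dp) :
    pvTab n m (pvG3 w1 w2 (k + 1))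
      ((List.range' 1 m).foldl (fun dp j =>
        pvSet2 dp (k + 1) j (min (min (pvGet2 dp (k + 1 - 1) j + 1) (pvGet2 dp (k + 1) (j - 1) + 1))
          (pvGet2 dp (k + 1 - 1) (j - 1) +
            (if w1.getD (k + 1 - 1) ' ' ≠ w2.getD (j - 1) ' ' then 1 else 0)))) dp) := by
  suffices H : ∀ t, t ≤ m → pvTab n m
      (fun i j => if i = k + 1 ∧ 1 ≤ j ∧ j ≤ t then (pvRows w1 w2 (k + 1)).getD j 0 else pvG3 w1 w2 k i j)
      ((List.range' 1 t).foldl (fun dp j =>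
        pvSet2 dp (k + 1) j (min (min (pvGet2 dp (k + 1 - 1) j + 1) (pvGet2 dp (k + 1) (j - 1) + 1))
          (pvGet2 dp (k + 1 - 1) (j - 1) +
            (if w1.getD (k + 1 - 1) ' ' ≠ w2.getD (j - 1) ' ' then 1 else 0)))) dp) by
    refine pvTab_congr (H m le_rfl) ?_
    intro i j hi hj
    unfold pvG3
    by_cases hik : i = k + 1
    · subst hik
      by_cases hj0 : j = 0
      · subst hj0
        simp only [true_and]
        rw [if_neg (show ¬ (1 ≤ 0 ∧ 0 ≤ m) by omega)]
        rw [if_neg (show ¬ k + 1 ≤ k by omega), if_pos (show k + 1 ≤ k + 1 by omega)]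
        rw [pvRows_getD_zero_col]
        unfold pvG2
        simp
      · simp only [true_and]
        rw [if_pos (show 1 ≤ j ∧ j ≤ m from ⟨by omega, by omega⟩)]
        rw [if_pos (show k + 1 ≤ k + 1 by omega)]
    · have : ¬ (i = k + 1 ∧ 1 ≤ j ∧ j ≤ m) := by tauto
      rw [if_neg this]
      by_cases hik' : i ≤ k
      · rw [if_pos hik', if_pos (by omega)]
      · rw [if_neg hik', if_neg (by omega)]
  intro t ht
  induction t with
  | zero =>
    simp only [List.range', List.foldl_nil]
    refine pvTab_congr h ?_
    intro i j hi hj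
    rw [if_neg (by omega)]
  | succ t ih =>
    rw [List.range'_concat]
    rw [List.foldl_append]
    simp only [List.foldl_cons, List.foldl_nil, one_mul]
    set dpt := (List.range' 1 t).foldl _ dp with hdpt
    have hprev := ih (by omega)
    -- the written value equals (pvRows (k+1)).getD (1 + t)
    have hlenprev : (pvRows w1 w2 k).length = w2.length + 1 := pvRows_length w1 w2 k
    obtain ⟨hp1, hp2, hp3⟩ := hprev
    have e1 : pvGet2 dpt (k + 1 - 1) (1 + t) = (pvRows w1 w2 k).getD (1 + t) 0 := by
      rw [hp3 _ _ (by omega) (by omega)]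
      simp only [show k + 1 - 1 = k by omega]
      rw [if_neg (by omega)]
      unfold pvG3
      rw [if_pos (le_refl k)]
    have e2 : pvGet2 dpt (k + 1) (1 + t - 1) = (pvRows w1 w2 (k + 1)).getD t 0 := by
      rw [hp3 _ _ (by omega) (by omega)]
      simp only [show 1 + t - 1 = t by omega]
      by_cases ht0 : t = 0
      · subst ht0
        rw [if_neg (by omega)]
        unfold pvG3
        rw [if_neg (by omega)]
        unfold pvG2
        rw [if_neg (by omega), if_pos rfl, pvRows_getD_zero_col]
      · simp only [true_and]
        rw [if_pos (show 1 ≤ t ∧ t ≤ t from ⟨by omega, le_rfl⟩)]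
    have e3 : pvGet2 dpt (k + 1 - 1) (1 + t - 1) = (pvRows w1 w2 k).getD t 0 := by
      rw [hp3 _ _ (by omega) (by omega)]
      simp only [show k + 1 - 1 = k by omega, show 1 + t - 1 = t by omega]
      rw [if_neg (by omega)]
      unfold pvG3
      rw [if_pos (le_refl k)]
    have hrec := pvNextRow_getD_succ (w1.getD k ' ') w2 (pvRows w1 w2 k) hlenprev t (by omega)
    have hval : min (min (pvGet2 dpt (k + 1 - 1) (1 + t) + 1) (pvGet2 dpt (k + 1) (1 + t - 1) + 1))
        (pvGet2 dpt (k + 1 - 1) (1 + t - 1) +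
          (if w1.getD (k + 1 - 1) ' ' ≠ w2.getD (1 + t - 1) ' ' then 1 else 0)) =
        (pvRows w1 w2 (k + 1)).getD (1 + t) 0 := by
      rw [e1, e2, e3]
      simp only [show k + 1 - 1 = k by omega, show 1 + t - 1 = t by omega]
      have : pvNextRow (w1.getD k ' ') w2 (pvRows w1 w2 k) = pvRows w1 w2 (k + 1) := rfl
      rw [this] at hrec
      rw [show 1 + t = t + 1 by omega, hrec]
    refine pvTab_congr (pvTab_set2 ⟨hp1, hp2, hp3⟩ (k + 1) (1 + t) _ (by omega) (by omega)) ?_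
    intro i j hi hj
    by_cases hij : i = k + 1 ∧ j = 1 + t
    · obtain ⟨hi1, hj1⟩ := hij
      subst hi1; subst hj1
      rw [if_pos ⟨rfl, rfl⟩, hval]
      simp only [true_and]
      rw [if_pos (show 1 ≤ 1 + t ∧ 1 + t ≤ t + 1 by omega)]
    · rw [if_neg hij]
      by_cases hc : i = k + 1 ∧ 1 ≤ j ∧ j ≤ t
      · rw [if_pos hc, if_pos (show i = k + 1 ∧ 1 ≤ j ∧ j ≤ t + 1 from ⟨hc.1, hc.2.1, by omega⟩)]
      · rw [if_neg hc, if_neg (show ¬ (i = k + 1 ∧ 1 ≤ j ∧ j ≤ t + 1) by omega)]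

theorem pvTab_stage3 (w1 w2 : List Char) (n m : Nat) (hn : n = w1.length) (hm : m = w2.length)
    (dp2 : List (List Int)) (h : pvTab n m pvG2 dp2) :
    pvTab n m (pvG3 w1 w2 n)
      ((List.range' 1 n).foldl (fun dp i =>
        (List.range' 1 m).foldl (fun dp j =>
          pvSet2 dp i j (min (min (pvGet2 dp (i - 1) j + 1) (pvGet2 dp i (j - 1) + 1))
            (pvGet2 dp (i - 1) (j - 1) +
              (if w1.getD (i - 1) ' ' ≠ w2.getD (j - 1) ' ' then 1 else 0)))) dp) dp2) := by
  suffices H : ∀ k, k ≤ n → pvTab n m (pvG3 w1 w2 k)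
      ((List.range' 1 k).foldl (fun dp i =>
        (List.range' 1 m).foldl (fun dp j =>
          pvSet2 dp i j (min (min (pvGet2 dp (i - 1) j + 1) (pvGet2 dp i (j - 1) + 1))
            (pvGet2 dp (i - 1) (j - 1) +
              (if w1.getD (i - 1) ' ' ≠ w2.getD (j - 1) ' ' then 1 else 0)))) dp) dp2) from
    H n le_rfl
  intro k hk
  induction k with
  | zero =>
    simp only [List.range', List.foldl_nil]
    refine pvTab_congr h ?_
    intro i j hi hj
    unfold pvG3
    by_cases hi0 : i = 0
    · subst hi0
      rw [if_pos (by omega)]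
      rw [pvRows_zero_getD w2 w1 j (by omega)]
      unfold pvG2; simp
    · rw [if_neg (by omega)]
  | succ k ih =>
    rw [List.range'_concat, List.foldl_append]
    simp only [List.foldl_cons, List.foldl_nil, one_mul, Nat.one_add]
    exact pvTab_inner w1 w2 n m hn hm k (by omega) _ (ih (by omega))

-- A's returned distance equals the final entry of B's row sequence
theorem lev_fst_eq (word1 word2 : String) :
    (levenstein_distance_dp word1 word2).1 =
      (pvRows word1.toList word2.toList word1.toList.length).getD word2.toList.length 0 := by
  unfold levenstein_distance_dp
  set w1 := word1.toList
  set w2 := word2.toList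
  set n := w1.length
  set m := w2.length
  have h0 := pvTab_stage0 n m
  have h1 := pvTab_stage1 n m _ h0
  have h2' := pvTab_stage2 n m _ h1
  have h2 : pvTab n m pvG2 _ := pvTab_congr h2' (by intro i j hi hj; rfl)
  have h3 := pvTab_stage3 w1 w2 n m rfl rfl _ h2
  obtain ⟨_, _, hval⟩ := h3
  have := hval n m (by omega) (by omega)
  simp only at this ⊢
  rw [this]
  unfold pvG3
  rw [if_pos (le_refl n)]

-- bridge: A's distance test equals B's banded test
theorem within_bridge (word dw : String) (maxd : Int) :
    pvWithin word.toList dw.toList maxd = decide ((levenstein_distance_dp word dw).1 ≤ maxd) := by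
  rw [pvWithin_eq, lev_fst_eq]

-- ===== top-level scan lemmas =====
theorem pvScan_of_mem (word : String) (maxd : Int) :
    ∀ (l : List (String × Int)) (b : Option (String × Int)),
      (∃ p ∈ l, p.1 = word) → pvScan word maxd l b = word := by
  intro l
  induction l with
  | nil => intro b h; simp at h
  | cons p t ih =>
    intro b h
    obtain ⟨w, f⟩ := p
    by_cases hw : w = word
    · simp [pvScan, hw]
    · have h' : ∃ q ∈ t, q.1 = word := by
        obtain ⟨q, hq, hq1⟩ := h
        rcases List.mem_cons.mp hq with rfl | hq
        · exact absurd hq1 hw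
        · exact ⟨q, hq, hq1⟩
      simp only [pvScan, beq_iff_eq, if_neg hw]
      cases b with
      | none =>
        rw [if_neg (by simp)]
        by_cases hwin : pvWithin word.toList w.toList maxd = true
        · rw [if_pos hwin]; exact ih _ h'
        · rw [if_neg hwin]; exact ih _ h'
      | some q =>
        by_cases hf : (decide (f ≤ q.2)) = true
        · rw [if_pos hf]; exact ih _ h'
        · rw [if_neg hf]
          by_cases hwin : pvWithin word.toList w.toList maxd = true
          · rw [if_pos hwin]; exact ih _ h'
          · rw [if_neg hwin]; exact ih _ h'

-- the scan is the running max?-fold over the within-filtered list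
theorem pvScan_eq_fold (word : String) (maxd : Int) :
    ∀ (l : List (String × Int)) (b : Option (String × Int)),
      (∀ p ∈ l, p.1 ≠ word) →
      pvScan word maxd l b =
        (match (l.filter (fun p => pvWithin word.toList p.1.toList maxd)).foldl
            (fun acc x => match acc with
              | none => some x
              | some m => if m.2 < x.2 then some x else some m) b with
          | some p => p.1
          | none => word) := by
  intro l
  induction l with
  | nil => intro b h; rfl
  | cons p t ih =>
    intro b h
    obtain ⟨w, f⟩ := p
    have hw : w ≠ word := h (w, f) (by simp)
    have ht : ∀ p ∈ t, p.1 ≠ word := fun q hq => h q (by simp [hq])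
    simp only [pvScan, beq_iff_eq, if_neg hw]
    by_cases hwin : pvWithin word.toList w.toList maxd = true
    · rw [List.filter_cons_of_pos (by simpa using hwin), List.foldl_cons]
      cases b with
      | none =>
        rw [if_neg (by simp), if_pos hwin, ih (some (w, f)) ht]
      | some q =>
        by_cases hf : f ≤ q.2
        · rw [if_pos (by simpa using hf), ih (some q) ht]
          have hred : (match some q with
              | none => some (w, f)
              | some m => if m.2 < (w, f).2 then some (w, f) else some m) = some q := by
            simp [show ¬ q.2 < f by omega]
          rw [hred]
        · rw [if_neg (by simpa using hf), if_pos hwin, ih (some (w, f)) ht]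
          have hred : (match some q with
              | none => some (w, f)
              | some m => if m.2 < (w, f).2 then some (w, f) else some m) = some (w, f) := by
            simp [show q.2 < f by omega]
          rw [hred]
    · rw [List.filter_cons_of_neg (by simpa using hwin)]
      cases b with
      | none =>
        rw [if_neg (by simp), if_neg hwin]
        exact ih none ht
      | some q =>
        by_cases hf : f ≤ q.2
        · rw [if_pos (by simpa using hf)]
          exact ih (some q) ht
        · rw [if_neg (by simpa using hf), if_neg hwin]
          exact ih (some q) ht

theorem max?_eq_fold (l : List (String × Int)) :
    PySem.List.max? l (fun x => x.2) =
      l.foldl (fun acc x => match acc with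
        | none => some x
        | some m => if m.2 < x.2 then some x else some m) none := by
  unfold PySem.List.max?
  congr 1
  funext acc x
  cases acc <;> rfl

-- ===== VERDICT (by name: the statement is the Claim_ definition above) =====
theorem autocorrect_word_dict_approach_spec : Claim_equal_autocorrect_word_dict_approach := by
  intro word word_counts max_distance _
  unfold Spec_autocorrect_word_dict_approach
  unfold autocorrect_word_dict_approach autocorrect_word_dict_approach_alt
  set d := PySem.Dict.ofList word_counts with hd
  by_cases hc : d.contains word
  · rw [if_pos hc]
    have hmem : word ∈ d.keys := (PySem.Dict.contains_iff_mem_keys d word).mp hc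
    have : ∃ p ∈ d.items, p.1 = word := by
      have : d.keys = d.items.map Prod.fst := rfl
      rw [this] at hmem
      obtain ⟨p, hp, hp1⟩ := List.mem_map.mp hmem
      exact ⟨p, hp, hp1⟩
    rw [pvScan_of_mem word max_distance d.items none this]
  · rw [if_neg hc]
    have hnk : ∀ p ∈ d.items, p.1 ≠ word := by
      intro p hp hpw
      apply hc
      rw [PySem.Dict.contains_iff_mem_keys]
      have : d.keys = d.items.map Prod.fst := rfl
      rw [this]
      exact List.mem_map.mpr ⟨p, hp, hpw⟩
    rw [pvScan_eq_fold word max_distance d.items none hnk]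
    -- A's candidate loop: filter then fresh inserts
    rw [PySem.List.foldl_ite_eq_foldl_filter (fun p => (levenstein_distance_dp word p.1).1 ≤ max_distance)
      (fun cand p => cand.insert p.1 p.2) d.items PySem.Dict.empty]
    have hfc : d.items.filter (fun p => decide ((levenstein_distance_dp word p.1).1 ≤ max_distance)) =
        d.items.filter (fun p => pvWithin word.toList p.1.toList max_distance) := by
      apply List.filter_congr
      intro p _
      rw [within_bridge]
    rw [hfc]
    set lf := d.items.filter (fun p => pvWithin word.toList p.1.toList max_distance) with hlf
    have hnodup : (lf.map Prod.fst).Nodup := by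
      have hdn : (d.items.map Prod.fst).Nodup := PySem.Dict.nodup_keys_ofList word_counts
      exact ((List.filter_sublist).map Prod.fst).nodup hdn
    have hitems : (lf.foldl (fun cand p => cand.insert p.1 p.2) PySem.Dict.empty).items = lf := by
      have := PySem.Dict.items_foldl_insert_fresh lf Prod.fst Prod.snd PySem.Dict.empty
        (fun a _ => PySem.Dict.contains_empty a.1) hnodup
      simpa using this
    show (match PySem.List.max?
        (List.foldl (fun cand p => cand.insert p.1 p.2) PySem.Dict.empty lf).items
        (fun x => x.2) with
      | some p => p.1
      | none => word) = _
    rw [hitems, max?_eq_fold]
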